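-- pv_equiv track=rewrite | github.com/ZPXing-TAA/PCO-V4 | multiroute_huaweimate.py | _advance_counts_by_route
-- ===== SOURCE A (Python) =====
-- from typing import Dict, List, Optional, Tuple
--
-- def _next_action_name(route, start_index):
--     for step in route[start_index + 1:]:
--         name = step[0]
--         if name not in ("record_start", "record_stop"):
--             return name
--     return "unknown"
--
-- def _advance_counts_by_route(route, action_counts: Dict, limit_record_starts: Optional[int] = None) -> Dict:
--     temp_counts = dict(action_counts)
--     consumed = 0
--     for i, step in enumerate(route):
--         if step[0] != "record_start":
--             continue
--         if limit_record_starts is not None and consumed >= limit_record_starts: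
--             break
--         action_name = _next_action_name(route, i)
--         temp_counts[action_name] = temp_counts.get(action_name, 0) + 1
--         consumed += 1
--     return temp_counts
-- ===== SOURCE B (Python) =====
-- def _advance_counts_by_route(route, action_counts, limit_record_starts=None):
--     # Backward pass: nxt[i] = name of the next non-record step after i ("unknown" if none).
--     n = len(route)
--     nxt = [None] * n
--     follow = "unknown"
--     for i in range(n - 1, -1, -1):
--         nxt[i] = follow
--         name = route[i][0]
--         if name not in ("record_start", "record_stop"):
--             follow = name
--     # Single forward pass with a decrementing budget.
--     counts = dict(action_counts)
--     budget = limit_record_starts if limit_record_starts is not None else n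
--     for i, step in enumerate(route):
--         if step[0] == "record_start":
--             if budget <= 0:
--                 break
--             counts[nxt[i]] = counts.get(nxt[i], 0) + 1
--             budget -= 1
--     return counts
-- ===== Notes on version B (the rewrite author's own statement) =====
-- stated objective: alternative
-- what changed: A rescans the route after every record_start to find the next action name (_next_action_name); B precomputes the next non-record action name for every index in one backward pass and then does a single forward counting pass with a decrementing budget.
-- outside the precondition, e.g. on _advance_counts_by_route([['record_start'], []], {}, 0): A returns {}, B raises IndexError
import Mathlib
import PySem

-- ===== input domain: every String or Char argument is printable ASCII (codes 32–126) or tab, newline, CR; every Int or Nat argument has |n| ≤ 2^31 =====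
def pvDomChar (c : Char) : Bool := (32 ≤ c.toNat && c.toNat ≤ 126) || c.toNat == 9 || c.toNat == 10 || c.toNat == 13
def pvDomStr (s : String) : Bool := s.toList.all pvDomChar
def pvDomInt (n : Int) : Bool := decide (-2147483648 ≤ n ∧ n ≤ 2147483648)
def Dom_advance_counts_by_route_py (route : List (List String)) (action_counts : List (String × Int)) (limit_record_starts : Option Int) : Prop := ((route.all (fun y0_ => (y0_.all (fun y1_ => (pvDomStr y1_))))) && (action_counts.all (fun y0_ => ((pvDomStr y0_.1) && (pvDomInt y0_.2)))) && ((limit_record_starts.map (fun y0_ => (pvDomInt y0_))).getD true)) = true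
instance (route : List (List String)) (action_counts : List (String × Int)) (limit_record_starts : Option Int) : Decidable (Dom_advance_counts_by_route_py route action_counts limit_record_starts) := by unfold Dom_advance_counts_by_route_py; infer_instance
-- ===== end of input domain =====

-- B replaces A's per-record_start forward rescan (_next_action_name) by one backward pass
-- precomputing the next non-record action name for every index, then a single forward pass
-- with a decrementing budget (an alternative strategy; not measured faster on the test inputs).

-- ===== PORT A =====
-- _next_action_name's scan over route[start_index+1:] (slice with nonnegative start = drop).
-- step[0] on an empty step raises IndexError in Python; Pre_ excludes empty steps, the "" default is never reached inside Pre_.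
def nextNameGo : List (List String) → String
  | [] => "unknown"
  | step :: rest =>
    let name := (PySem.List.pyGet? step 0).getD ""
    if name ≠ "record_start" ∧ name ≠ "record_stop" then name else nextNameGo rest

def next_action_name (route : List (List String)) (start_index : Nat) : String :=
  nextNameGo (route.drop (start_index + 1))

-- the 'for i, step in enumerate(route)' loop with break, state (temp_counts, consumed)
def aLoop (route : List (List String)) (limit : Option Int) :
    Nat → List (List String) → PySem.Dict String Int → Int → PySem.Dict String Int
  | _, [], tc, _ => tc
  | i, step :: rest, tc, consumed =>
    if (PySem.List.pyGet? step 0).getD "" ≠ "record_start" then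
      aLoop route limit (i + 1) rest tc consumed
    else
      match limit with
      | some l =>
        if l ≤ consumed then tc   -- break
        else
          let an := next_action_name route i
          aLoop route limit (i + 1) rest (tc.insert an (tc.getD an 0 + 1)) (consumed + 1)
      | none =>
          let an := next_action_name route i
          aLoop route limit (i + 1) rest (tc.insert an (tc.getD an 0 + 1)) (consumed + 1)

def advance_counts_by_route_py (route : List (List String)) (action_counts : List (String × Int)) (limit_record_starts : Option Int) : List (String × Int) :=
  (aLoop route limit_record_starts 0 route (PySem.Dict.ofList action_counts) 0).items

-- ===== PORT B =====
-- backward pass: bNext l = (next non-record name in l or "unknown", the nxt value for each index of l)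
def bNext : List (List String) → String × List String
  | [] => ("unknown", [])
  | step :: rest =>
    let p := bNext rest
    let name := (PySem.List.pyGet? step 0).getD ""
    (if name ≠ "record_start" ∧ name ≠ "record_stop" then name else p.1, p.1 :: p.2)

-- forward pass over route zipped with nxt, with a decrementing budget
def bLoop : Int → PySem.Dict String Int → List (List String × String) → PySem.Dict String Int
  | _, counts, [] => counts
  | budget, counts, (step, nx) :: rest =>
    if (PySem.List.pyGet? step 0).getD "" = "record_start" then
      if budget ≤ 0 then counts   -- break
      else bLoop (budget - 1) (counts.insert nx (counts.getD nx 0 + 1)) rest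
    else bLoop budget counts rest

def advance_counts_by_route_py_alt (route : List (List String)) (action_counts : List (String × Int)) (limit_record_starts : Option Int) : List (String × Int) :=
  let nxt := (bNext route).2
  let budget := limit_record_starts.getD (route.length : Int)
  (bLoop budget (PySem.Dict.ofList action_counts) (route.zip nxt)).items

-- ===== PRECONDITION & SPEC =====
-- Pre_ excludes routes containing an empty step, on which Python's step[0] raises IndexError.
def Pre_advance_counts_by_route_py (route : List (List String)) (action_counts : List (String × Int)) (limit_record_starts : Option Int) : Prop :=
  ∀ step ∈ route, step ≠ []
instance (route : List (List String)) (action_counts : List (String × Int)) (limit_record_starts : Option Int) : Decidable (Pre_advance_counts_by_route_py route action_counts limit_record_starts) := by unfold Pre_advance_counts_by_route_py; infer_instance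

def pvWitness_advance_counts_by_route_py : List (List String) × (List (String × Int)) × Option Int :=
  ([["record_start"], ["record_stop"], ["go", "x"], ["record_start"]], [("go", 2)], some 1)

def Spec_advance_counts_by_route_py (route : List (List String)) (action_counts : List (String × Int)) (limit_record_starts : Option Int) (out : List (String × Int)) : Prop := out = advance_counts_by_route_py_alt route action_counts limit_record_starts
instance (route : List (List String)) (action_counts : List (String × Int)) (limit_record_starts : Option Int) (out : List (String × Int)) : Decidable (Spec_advance_counts_by_route_py route action_counts limit_record_starts out) := by unfold Spec_advance_counts_by_route_py; infer_instance

-- ===== CLAIM (what is proved, stated in full; the proofs are below) =====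
def Claim_equal_advance_counts_by_route_py : Prop := ∀ (route : List (List String)) (action_counts : List (String × Int)) (limit_record_starts : Option Int), Dom_advance_counts_by_route_py route action_counts limit_record_starts → Pre_advance_counts_by_route_py route action_counts limit_record_starts → Spec_advance_counts_by_route_py route action_counts limit_record_starts (advance_counts_by_route_py route action_counts limit_record_starts)

-- ===== LEMMAS AND PROOFS =====

-- the backward pass's carried value is exactly A's forward rescan result
lemma bNext_fst_eq (l : List (List String)) : (bNext l).1 = nextNameGo l := by
  induction l with
  | nil => rfl
  | cons step rest ih =>
    simp only [bNext, nextNameGo]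
    split <;> simp [ih]

lemma loop_agree (route : List (List String)) (limit : Option Int) :
    ∀ (rest : List (List String)) (i : Nat) (tc : PySem.Dict String Int) (consumed budget : Int),
      route.drop i = rest →
      (match limit with
       | some l => budget = l - consumed
       | none => (rest.length : Int) ≤ budget) →
      aLoop route limit i rest tc consumed = bLoop budget tc (rest.zip (bNext rest).2) := by
  intro rest
  induction rest with
  | nil => intro i tc consumed budget _ _; rfl
  | cons step rest ih =>
    intro i tc consumed budget hdrop hbud
    have hdrop' : route.drop (i + 1) = rest := by
      rw [← List.tail_drop, hdrop]; rfl
    have han : next_action_name route i = (bNext rest).1 := by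
      rw [next_action_name, hdrop', bNext_fst_eq]
    simp only [bNext, aLoop, List.zip_cons_cons, bLoop]
    by_cases hname : (PySem.List.pyGet? step 0).getD "" = "record_start"
    · rw [if_pos hname, if_neg (by simp [hname])]
      match limit with
      | some l =>
        simp only at hbud
        by_cases hl : l ≤ consumed
        · simp only [if_pos hl, if_pos (show budget ≤ 0 by omega)]
        · simp only [if_neg hl, if_neg (show ¬ budget ≤ 0 by omega), han]
          exact ih (i + 1) _ (consumed + 1) (budget - 1) hdrop' (by simp; omega)
      | none =>
        simp only [List.length_cons] at hbud
        push_cast at hbud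
        simp only [if_neg (show ¬ budget ≤ 0 by omega), han]
        exact ih (i + 1) _ (consumed + 1) (budget - 1) hdrop' (by push_cast; omega)
    · rw [if_neg hname, if_pos hname]
      refine ih (i + 1) tc consumed budget hdrop' ?_
      match limit with
      | some l => exact hbud
      | none => simp only [List.length_cons] at hbud ⊢; push_cast at hbud ⊢; omega

-- ===== VERDICT (by name: the statement is the Claim_ definition above) =====
theorem advance_counts_by_route_py_spec : Claim_equal_advance_counts_by_route_py := by
  intro route action_counts limit _ _
  show _ = _
  unfold advance_counts_by_route_py advance_counts_by_route_py_alt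
  congr 1
  apply loop_agree route limit route 0 _ 0 _ rfl
  match limit with
  | some l => simp
  | none => simp
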